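-- pv_equiv track=rewrite | github.com/xefiji/adventofcode | 2022/day8/main.py | decreases
-- ===== SOURCE A (Python) =====
-- def decreases(list):
--     current = list[0]
--     for i in range(len(list)):
--         if i == 0:
--             continue
--         if list[i] >= current:
--             return False
--     return True
-- ===== SOURCE B (Python) =====
-- def decreases(list):
--     first = list[0]
--     rest = list[1:]
--     return not rest or max(rest) < first
-- ===== Notes on version B (the rewrite author's own statement) =====
-- stated objective: simpler
-- what changed: Replaces A's index loop with an early return by one aggregate: take max of the tail and compare it once against the first element.
import Mathlib
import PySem

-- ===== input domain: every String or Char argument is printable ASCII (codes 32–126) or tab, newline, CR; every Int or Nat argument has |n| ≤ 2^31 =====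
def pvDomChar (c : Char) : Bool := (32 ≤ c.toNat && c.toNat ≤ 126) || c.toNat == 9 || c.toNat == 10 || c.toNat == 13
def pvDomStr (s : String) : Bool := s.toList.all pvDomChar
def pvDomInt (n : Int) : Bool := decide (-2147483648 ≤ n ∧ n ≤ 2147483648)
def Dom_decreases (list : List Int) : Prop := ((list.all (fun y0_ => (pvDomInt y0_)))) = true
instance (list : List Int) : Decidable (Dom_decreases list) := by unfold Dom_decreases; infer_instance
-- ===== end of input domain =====

-- B replaces A's element-by-element early-return scan with one aggregate (max of the tail)
-- and a single comparison; objective: simpler. Return-value equivalence on nonempty lists.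

-- ===== PORT A =====
-- the for-loop over range(len(list)) with its two branches and early return
def decLoopA (l : List Int) (current : Int) : List Int → Bool
  | [] => true
  | i :: is =>
      if i = 0 then decLoopA l current is
      else if current ≤ PySem.List.pyGetD l i 0 then false
      else decLoopA l current is

def decreases (list : List Int) : Bool :=
  match PySem.List.pyGet? list 0 with          -- current = list[0]; none = IndexError, excluded by Pre_
  | none => false
  | some current => decLoopA list current (PySem.List.pyRange 0 list.length 1)

-- ===== PORT B =====
def decreases_alt (list : List Int) : Bool :=
  match PySem.List.pyGet? list 0 with          -- first = list[0]; none = IndexError, excluded by Pre_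
  | none => false
  | some first =>
      let rest := PySem.List.slice list (some 1) none   -- list[1:]
      match PySem.List.max? rest (fun y => y) with      -- not rest or max(rest) < first
      | none => true
      | some m => m < first

-- ===== PRECONDITION & SPEC =====
-- A raises IndexError on the empty list (list[0]); B raises there too.
def Pre_decreases (list : List Int) : Prop := list ≠ []
instance (list : List Int) : Decidable (Pre_decreases list) := by unfold Pre_decreases; infer_instance
def pvWitness_decreases : List Int := [5, 3, 1]
def Spec_decreases (list : List Int) (out : Bool) : Prop := out = decreases_alt list
instance (list : List Int) (out : Bool) : Decidable (Spec_decreases list out) := by unfold Spec_decreases; infer_instance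

-- ===== CLAIM (what is proved, stated in full; the proofs are below) =====
def Claim_equal_decreases : Prop := ∀ (list : List Int), Dom_decreases list → Pre_decreases list → Spec_decreases list (decreases list)

-- ===== LEMMAS AND PROOFS =====
lemma pyGetD_cons_nat (c : Int) (t : List Int) (k : Nat) (hk : k < t.length) :
    PySem.List.pyGetD (c :: t) ((k : Int) + 1) 0 = t[k] := by
  have h : ((k : Int) + 1) = ((k + 1 : Nat) : Int) := by push_cast; ring
  rw [h, PySem.List.pyGetD_natCast, List.getD_cons_succ, List.getD_eq_getElem t 0 hk]

lemma decLoopA_all (l : List Int) (c : Int) (idxs : List Int) :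
    decLoopA l c idxs = idxs.all (fun i => i == 0 || decide (PySem.List.pyGetD l i 0 < c)) := by
  induction idxs with
  | nil => rfl
  | cons i is ih =>
      simp only [decLoopA, List.all_cons]
      by_cases h0 : i = 0
      · simp [h0, ih]
      · by_cases hge : c ≤ PySem.List.pyGetD l i 0
        · simp [h0, hge, not_lt.mpr hge]
        · simp [h0, hge, ih, lt_of_not_ge hge]

lemma decreases_cons (c : Int) (t : List Int) :
    decreases (c :: t) = decide (∀ x ∈ t, x < c) := by
  simp only [decreases, PySem.List.pyGet?_zero_cons, decLoopA_all]
  rw [Bool.eq_iff_iff, List.all_eq_true, decide_eq_true_iff]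
  constructor
  · intro h x hx
    obtain ⟨k, hk, rfl⟩ := List.mem_iff_getElem.mp hx
    have hmem : ((k : Int) + 1) ∈ PySem.List.pyRange 0 ((c :: t).length : Int) 1 := by
      rw [PySem.List.mem_pyRange_one]
      constructor <;> [omega; (simp [List.length_cons]; omega)]
    have := h _ hmem
    simp only [Bool.or_eq_true, beq_iff_eq, decide_eq_true_iff] at this
    rcases this with h1 | h2
    · omega
    · rwa [pyGetD_cons_nat c t k hk] at h2
  · intro h i hi
    rw [PySem.List.mem_pyRange_one] at hi
    by_cases h0 : i = 0
    · simp [h0]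
    · have h1 : 1 ≤ i := by omega
      have hlt : i < ((c :: t).length : Int) := hi.2
      simp only [List.length_cons] at hlt
      obtain ⟨k, hkk, hik⟩ : ∃ k : Nat, k < t.length ∧ i = (k : Int) + 1 :=
        ⟨i.toNat - 1, by omega, by omega⟩
      have hv : PySem.List.pyGetD (c :: t) i 0 = t[k] := by
        rw [hik]; exact pyGetD_cons_nat c t k hkk
      simp only [Bool.or_eq_true, beq_iff_eq, decide_eq_true_iff]
      right
      rw [hv]
      exact h _ (List.getElem_mem hkk)

lemma decreases_alt_cons (c : Int) (t : List Int) :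
    decreases_alt (c :: t) = decide (∀ x ∈ t, x < c) := by
  simp only [decreases_alt, PySem.List.pyGet?_zero_cons]
  have hslice : PySem.List.slice (c :: t) (some 1) none = t := by
    rw [PySem.List.slice_from_one]
    rfl
  rw [hslice]
  rcases hmax : PySem.List.max? t (fun y => y) with _ | m
  · have ht : t = [] := (PySem.List.max?_eq_none_iff _ _).mp hmax
    simp [ht]
  · rw [Bool.eq_iff_iff, decide_eq_true_iff, decide_eq_true_iff]
    constructor
    · intro hm x hx
      exact lt_of_le_of_lt (PySem.List.max?_isMax hmax x hx) hm
    · intro h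
      exact h m (PySem.List.max?_mem hmax)

-- ===== VERDICT (by name: the statement is the Claim_ definition above) =====
theorem decreases_spec : Claim_equal_decreases := by
  intro list _ hpre
  cases list with
  | nil => exact absurd rfl hpre
  | cons c t =>
      unfold Spec_decreases
      rw [decreases_cons, decreases_alt_cons]
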